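-- pv_equiv track=rewrite | github.com/adityasinghchauhan110-blip/Mission-DSA | Hackerrank/Jim_and_the_Jokes.py | jim_and_jokes
-- ===== SOURCE A (Python) =====
-- def base_to_decimal(day_str, base):
--     try:
--
--         return int(day_str, base)
--     except ValueError:
--
--         return None
--
-- def jim_and_jokes(dates):
--     value_count = {}
--     for month, day in dates:
--
--         day_str = str(day)
--
--         if all(int(d) < month for d in day_str):
--             val = base_to_decimal(day_str, month)
--             if val is not None:
--                 if val in value_count:
--                     value_count[val] += 1
--                 else:
--                     value_count[val] = 1
--
--     pairs = sum(n * (n-1) // 2 for n in value_count.values())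
--     return pairs
-- ===== SOURCE B (Python) =====
-- def base_to_decimal(day_str, base):
--     try:
--         return int(day_str, base)
--     except ValueError:
--         return None
--
-- def jim_and_jokes(dates):
--     # Single pass: count, for each valid converted value, how many earlier
--     # valid values equal it (no counting dict, no closed-form combination).
--     prev = []
--     total = 0
--     for month, day in dates:
--         day_str = str(day)
--         if all(int(d) < month for d in day_str):
--             val = base_to_decimal(day_str, month)
--             if val is not None:
--                 total += prev.count(val)
--                 prev.append(val)
--     return total
-- ===== Notes on version B (the rewrite author's own statement) =====
-- stated objective: alternative
-- what changed: Replaces the value->count dict plus the closed-form sum of n*(n-1)//2 over its counts by a single online pass that, for each valid converted value, adds the number of equal values seen so far to a running pair total.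
import Mathlib
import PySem

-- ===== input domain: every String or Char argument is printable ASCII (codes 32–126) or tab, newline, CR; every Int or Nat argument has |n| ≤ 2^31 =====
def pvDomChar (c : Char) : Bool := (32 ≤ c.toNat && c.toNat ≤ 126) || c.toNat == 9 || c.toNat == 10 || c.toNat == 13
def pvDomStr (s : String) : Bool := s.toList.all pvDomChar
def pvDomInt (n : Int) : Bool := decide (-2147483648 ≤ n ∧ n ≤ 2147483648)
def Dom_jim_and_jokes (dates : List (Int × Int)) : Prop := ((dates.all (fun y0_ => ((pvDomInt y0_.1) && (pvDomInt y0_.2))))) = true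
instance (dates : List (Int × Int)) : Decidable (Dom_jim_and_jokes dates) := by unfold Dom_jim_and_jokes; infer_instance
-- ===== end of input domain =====

-- B replaces A's counting dict + closed-form n*(n-1)//2 sum by one online pass adding,
-- per valid value, the number of equal earlier values; same filtering and conversion.


-- ===== PORT A =====
-- int(d) on a single digit char, exact for '0'..'9' (Pre_ keeps days ≥ 0, so str(day) is all digits)
def pvDigit (c : Char) : Int := (c.toNat : Int) - 48

-- base_to_decimal: int(day_str, base) with ValueError -> None is exactly ofStrBase?
def base_to_decimal (day_str : String) (base : Int) : Option Int :=
  PySem.Int.ofStrBase? day_str base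

def jim_and_jokes (dates : List (Int × Int)) : Int :=
  let value_count : PySem.Dict Int Int :=
    dates.foldl (fun vc md =>
      let day_str := PySem.Int.toStr md.2
      if day_str.toList.all (fun d => decide (pvDigit d < md.1)) then
        match base_to_decimal day_str md.1 with
        | some val =>
            if (vc.get? val).isSome then vc.insert val (vc.getD val 0 + 1)
            else vc.insert val 1
        | none => vc
      else vc) PySem.Dict.empty
  value_count.values.foldl (fun acc n => acc + PySem.Int.floordiv (n * (n - 1)) 2) 0

-- ===== PORT B =====
def jim_and_jokes_alt (dates : List (Int × Int)) : Int :=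
  (dates.foldl (fun (st : List Int × Int) md =>
      let day_str := PySem.Int.toStr md.2
      if day_str.toList.all (fun d => decide (pvDigit d < md.1)) then
        match base_to_decimal day_str md.1 with
        | some val => (st.1 ++ [val], st.2 + (st.1.count val : Int))
        | none => st
      else st) ([], 0)).2

-- ===== PRECONDITION & SPEC =====
-- Pre_ excludes negative days: there str(day) contains '-', so A's guard raises an
-- uncaught ValueError from int('-') (B raises identically).
def Pre_jim_and_jokes (dates : List (Int × Int)) : Prop :=
  (dates.all (fun md => decide (0 ≤ md.2))) = true
instance (dates : List (Int × Int)) : Decidable (Pre_jim_and_jokes dates) := by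
  unfold Pre_jim_and_jokes; infer_instance

def pvWitness_jim_and_jokes : (List (Int × Int)) := [(2, 10), (4, 2), (16, 10), (2, 10000)]

def Spec_jim_and_jokes (dates : List (Int × Int)) (out : Int) : Prop := out = jim_and_jokes_alt dates
instance (dates : List (Int × Int)) (out : Int) : Decidable (Spec_jim_and_jokes dates out) := by unfold Spec_jim_and_jokes; infer_instance

-- ===== CLAIM (what is proved, stated in full; the proofs are below) =====
def Claim_equal_jim_and_jokes : Prop := ∀ (dates : List (Int × Int)), Dom_jim_and_jokes dates → Pre_jim_and_jokes dates → Spec_jim_and_jokes dates (jim_and_jokes dates)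

-- ===== LEMMAS AND PROOFS =====

-- the per-date extraction both ports share
def pvStep (m d : Int) : Option Int :=
  let ds := PySem.Int.toStr d
  if ds.toList.all (fun c => decide (pvDigit c < m)) then base_to_decimal ds m else none

def pvVals (dates : List (Int × Int)) : List Int :=
  dates.flatMap (fun md => match pvStep md.1 md.2 with | some v => [v] | none => [])

-- pair count of A: n*(n-1)//2
def pvPF (n : Int) : Int := PySem.Int.floordiv (n * (n - 1)) 2

-- online pair count of B over a value list, given already-seen values
def pvPP : List Int → List Int → Int
  | _, [] => 0
  | prev, v :: t => (prev.count v : Int) + pvPP (prev ++ [v]) t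

theorem pvPF_succ (x : Int) : pvPF (x + 1) = pvPF x + x := by
  obtain ⟨m, hm⟩ := Int.even_mul_succ_self (x - 1)
  have h1 : x * (x - 1) = 2 * m := by ring_nf at hm ⊢; linarith
  have h2 : (x + 1) * (x + 1 - 1) = 2 * m + 2 * x := by ring_nf at h1 ⊢; linarith
  unfold pvPF
  rw [PySem.Int.floordiv_eq_ediv_of_pos (by norm_num), PySem.Int.floordiv_eq_ediv_of_pos (by norm_num), h2, h1]
  omega

theorem A_dict_eq (dates : List (Int × Int)) (vc : PySem.Dict Int Int) :
    dates.foldl (fun vc md =>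
      let day_str := PySem.Int.toStr md.2
      if day_str.toList.all (fun d => decide (pvDigit d < md.1)) then
        match base_to_decimal day_str md.1 with
        | some val =>
            if (vc.get? val).isSome then vc.insert val (vc.getD val 0 + 1)
            else vc.insert val 1
        | none => vc
      else vc) vc
    = (pvVals dates).foldl (fun d v => d.insert v (d.getD v 0 + 1)) vc := by
  induction dates generalizing vc with
  | nil => rfl
  | cons md t ih =>
    simp only [List.foldl_cons, pvVals, List.flatMap_cons, List.foldl_append, pvStep,
      base_to_decimal] at *
    by_cases hg : ((PySem.Int.toStr md.2).toList.all (fun d => decide (pvDigit d < md.1))) = true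
    · simp only [hg, if_pos]
      cases hv : PySem.Int.ofStrBase? (PySem.Int.toStr md.2) md.1 with
      | none => simpa [hv] using ih vc
      | some v =>
        simp only [hv, List.foldl_cons]
        by_cases hc : (vc.get? v).isSome
        · simpa [hc] using ih _
        · have h0 : vc.getD v 0 = 0 := by
            apply PySem.Dict.getD_of_get?_eq_none
            cases h : vc.get? v with
            | none => rfl
            | some w => simp [h] at hc
          simp only [hc, if_false, Bool.false_eq_true]
          rw [h0]
          simpa using ih _
    · simp only [hg, if_false]
      simpa [hg] using ih vc

theorem B_state_eq (dates : List (Int × Int)) (prev : List Int) (tot : Int) :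
    dates.foldl (fun (st : List Int × Int) md =>
      let day_str := PySem.Int.toStr md.2
      if day_str.toList.all (fun d => decide (pvDigit d < md.1)) then
        match base_to_decimal day_str md.1 with
        | some val => (st.1 ++ [val], st.2 + (st.1.count val : Int))
        | none => st
      else st) (prev, tot)
    = (prev ++ pvVals dates, tot + pvPP prev (pvVals dates)) := by
  induction dates generalizing prev tot with
  | nil => simp [pvVals, pvPP]
  | cons md t ih =>
    simp only [List.foldl_cons, pvVals, List.flatMap_cons, pvStep, base_to_decimal] at *
    by_cases hg : ((PySem.Int.toStr md.2).toList.all (fun d => decide (pvDigit d < md.1))) = true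
    · simp only [hg, if_pos]
      cases hv : PySem.Int.ofStrBase? (PySem.Int.toStr md.2) md.1 with
      | none => simpa [hv] using ih prev tot
      | some v =>
        simp only [hv]
        rw [ih]
        simp [pvPP, add_assoc]
    · simp only [hg, if_false]
      simpa [hg] using ih prev tot

theorem pvPP_append (l : List Int) (v : Int) (prev : List Int) :
    pvPP prev (l ++ [v]) = pvPP prev l + ((prev ++ l).count v : Int) := by
  induction l generalizing prev with
  | nil => simp [pvPP]
  | cons x t ih =>
    simp only [List.cons_append, pvPP, ih, List.append_assoc, List.singleton_append,
      List.nil_append]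
    push_cast [List.count_append, List.count_cons, List.nil_append]
    ring

-- sum of pvPF over counts, over the distinct values
def pvG (vals : List Int) : Int :=
  ((PySem.Set.ofList vals).map (fun k => pvPF ((vals.count k : Int)))).sum

theorem sum_bump (S : List Int) (c : Int → Int) (v : Int) (hnd : S.Nodup) (hv : v ∈ S) :
    (S.map (fun k => pvPF (c k + if k = v then 1 else 0))).sum
      = (S.map (fun k => pvPF (c k))).sum + c v := by
  induction S with
  | nil => cases hv
  | cons x t ih =>
    rcases List.nodup_cons.mp hnd with ⟨hx, hnt⟩
    simp only [List.map_cons, List.sum_cons]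
    by_cases hxv : x = v
    · subst hxv
      have hcg : ∀ k ∈ t, (fun k => pvPF (c k + if k = x then 1 else 0)) k = (fun k => pvPF (c k)) k := by
        intro k hk
        have : k ≠ x := fun e => hx (e ▸ hk)
        simp [this]
      rw [List.map_congr_left hcg, if_pos rfl, pvPF_succ]
      ring
    · have hvt : v ∈ t := by
        rcases List.mem_cons.mp hv with h | h
        · exact absurd h.symm hxv
        · exact h
      rw [ih hnt hvt, if_neg hxv]
      ring

theorem pvG_append (l : List Int) (v : Int) :
    pvG (l ++ [v]) = pvG l + (l.count v : Int) := by
  have hofl : PySem.Set.ofList (l ++ [v]) = PySem.Set.add (PySem.Set.ofList l) v := by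
    simp [PySem.Set.ofList_eq_foldl, List.foldl_append]
  by_cases hv : v ∈ l
  · have hmem : v ∈ PySem.Set.ofList l := (PySem.Set.mem_ofList _ _).mpr hv
    have hadd : PySem.Set.add (PySem.Set.ofList l) v = PySem.Set.ofList l := by
      simp [PySem.Set.add, PySem.Set.contains, hmem]
    unfold pvG
    rw [hofl, hadd]
    have hcnt : ∀ k, ((l ++ [v]).count k : Int) = (l.count k : Int) + (if k = v then 1 else 0) := by
      intro k
      by_cases h : k = v
      · simp [List.count_append, List.count_singleton, h]
      · have hvk : ¬ v = k := fun e => h e.symm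
        simp [List.count_append, List.count_singleton, hvk]
        exact h
    have := sum_bump (PySem.Set.ofList l) (fun k => (l.count k : Int)) v
      (PySem.Set.nodup_ofList l) hmem
    calc ((PySem.Set.ofList l).map (fun k => pvPF (((l ++ [v]).count k : Int)))).sum
        = ((PySem.Set.ofList l).map (fun k => pvPF ((l.count k : Int) + if k = v then 1 else 0))).sum := by
          apply congrArg; exact List.map_congr_left (fun k _ => by rw [hcnt k])
      _ = ((PySem.Set.ofList l).map (fun k => pvPF ((l.count k : Int)))).sum + (l.count v : Int) := this
  · have hmem : v ∉ PySem.Set.ofList l := fun h => hv ((PySem.Set.mem_ofList _ _).mp h)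
    have hadd : PySem.Set.add (PySem.Set.ofList l) v = PySem.Set.ofList l ++ [v] := by
      simp [PySem.Set.add, PySem.Set.contains, hmem]
    unfold pvG
    rw [hofl, hadd, List.map_append, List.sum_append]
    have hcnt0 : l.count v = 0 := List.count_eq_zero.mpr hv
    have h1 : ∀ k ∈ PySem.Set.ofList l,
        pvPF (((l ++ [v]).count k : Int)) = pvPF ((l.count k : Int)) := by
      intro k hk
      have hkv : k ≠ v := fun e => hv (e ▸ (PySem.Set.mem_ofList _ _).mp hk)
      have hvk : ¬ v = k := fun e => hkv e.symm
      simp [List.count_append, List.count_singleton, hvk]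
    rw [List.map_congr_left h1]
    simp [List.count_append, hcnt0, pvPF, PySem.Int.floordiv]

theorem pvG_eq_pvPP (vals : List Int) : pvG vals = pvPP [] vals := by
  induction vals using List.reverseRecOn with
  | nil => simp [pvG, pvPP, PySem.Set.ofList]
  | append_singleton l v ih => rw [pvG_append, pvPP_append, ih]; simp

-- ===== VERDICT (by name: the statement is the Claim_ definition above) =====
theorem jim_and_jokes_spec : Claim_equal_jim_and_jokes := by
  intro dates _ _
  unfold Spec_jim_and_jokes jim_and_jokes jim_and_jokes_alt
  rw [A_dict_eq, B_state_eq, PySem.Dict.foldl_insert_getD_add_one_eq_counter]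
  simp only [zero_add, List.nil_append]
  have hvals : (PySem.Dict.counter (pvVals dates)).values
      = (PySem.Set.ofList (pvVals dates)).map (fun k => ((pvVals dates).count k : Int)) := by
    have := PySem.Dict.items_counter (xs := pvVals dates)
    simp only [PySem.Dict.values, this, List.map_map]
    rfl
  rw [hvals, PySem.List.foldl_add]
  simp only [List.map_map, zero_add]
  have := pvG_eq_pvPP (pvVals dates)
  unfold pvG at this
  rw [← this]
  rfl
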